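-- pv_equiv track=rewrite | github.com/KushAsrani/Alumni-Portal | api/resume_api.py | score_formatting
-- ===== SOURCE A (Python) =====
-- from typing import Dict, List, Optional, Tuple
--
-- def score_formatting(text: str) -> Tuple[int, List[str]]:
--     """Check for excessive caps and reasonable line lengths. Max 15 pts."""
--     lines = [l for l in text.split("\n") if l.strip()]
--     feedback = []
--     deductions = 0
--
--     # Check for excessive all-caps lines
--     caps_lines = [l for l in lines if l.isupper() and len(l) > 15]
--     if len(caps_lines) > 5:
--         deductions += 5
--         feedback.append("Too many all-caps lines — use normal title case for headings.")
--
--     # Check for extremely long lines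
--     long_lines = [l for l in lines if len(l) > 200]
--     if len(long_lines) > 3:
--         deductions += 5
--         feedback.append("Some lines are very long — break up dense paragraphs.")
--
--     # Check for very short lines (possible OCR or formatting issues)
--     very_short = [l for l in lines if len(l.strip()) <= 2]
--     if len(very_short) > 10:
--         deductions += 5
--         feedback.append("Possible formatting issues — check for stray characters or OCR artifacts.")
--
--     score = max(0, 15 - deductions)
--     return score, feedback
-- ===== SOURCE B (Python) =====
-- def score_formatting(text):
--     """Check for excessive caps and reasonable line lengths. Max 15 pts."""
--     caps_count = long_count = short_count = 0
--     for l in text.split("\n"):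
--         if not l.strip():
--             continue
--         if l.isupper() and len(l) > 15:
--             caps_count += 1
--         if len(l) > 200:
--             long_count += 1
--         if len(l.strip()) <= 2:
--             short_count += 1
--     feedback = []
--     deductions = 0
--     if caps_count > 5:
--         deductions += 5
--         feedback.append("Too many all-caps lines — use normal title case for headings.")
--     if long_count > 3:
--         deductions += 5
--         feedback.append("Some lines are very long — break up dense paragraphs.")
--     if short_count > 10:
--         deductions += 5
--         feedback.append("Possible formatting issues — check for stray characters or OCR artifacts.")
--     return max(0, 15 - deductions), feedback
-- ===== Notes on version B (the rewrite author's own statement) =====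
-- stated objective: simpler
-- what changed: Replaces the four list comprehensions (filter + three filtered sublists that are only counted) with one pass over the split lines maintaining three integer counters, so no intermediate lists are built.
import Mathlib
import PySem

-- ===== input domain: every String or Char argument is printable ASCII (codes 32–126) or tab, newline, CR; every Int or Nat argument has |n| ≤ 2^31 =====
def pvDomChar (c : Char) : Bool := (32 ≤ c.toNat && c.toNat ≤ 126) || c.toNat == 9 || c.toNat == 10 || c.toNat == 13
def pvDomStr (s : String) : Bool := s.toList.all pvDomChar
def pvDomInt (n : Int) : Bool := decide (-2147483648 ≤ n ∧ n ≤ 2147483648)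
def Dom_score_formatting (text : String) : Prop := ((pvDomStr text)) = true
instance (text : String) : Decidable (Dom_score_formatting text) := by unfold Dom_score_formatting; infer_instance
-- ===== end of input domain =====

-- B replaces A's four list comprehensions by a single counting pass over the split lines (objective: simpler).

-- ===== PORT A =====
-- Python str.isupper(): some cased character and no lowercase one; exact on the ASCII domain,
-- where the cased characters are exactly the letters.
def pyIsupperCs (cs : List Char) : Bool :=
  cs.any PySem.Chars.isupper && !(cs.any PySem.Chars.islower)

def score_formatting (text : String) : Int × List String :=
  let lines := (PySem.Chars.splitOn text.toList ['\n']).filter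
                 (fun l => !(PySem.Chars.strip l).isEmpty)
  let feedback : List String := []
  let deductions : Int := 0
  let caps_lines := lines.filter (fun l => pyIsupperCs l && decide (l.length > 15))
  let (deductions, feedback) :=
    if caps_lines.length > 5 then
      (deductions + 5, feedback ++ ["Too many all-caps lines — use normal title case for headings."])
    else (deductions, feedback)
  let long_lines := lines.filter (fun l => decide (l.length > 200))
  let (deductions, feedback) :=
    if long_lines.length > 3 then
      (deductions + 5, feedback ++ ["Some lines are very long — break up dense paragraphs."])
    else (deductions, feedback)
  let very_short := lines.filter (fun l => decide ((PySem.Chars.strip l).length ≤ 2))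
  let (deductions, feedback) :=
    if very_short.length > 10 then
      (deductions + 5, feedback ++ ["Possible formatting issues — check for stray characters or OCR artifacts."])
    else (deductions, feedback)
  (max 0 (15 - deductions), feedback)

-- ===== PORT B =====
-- one loop iteration of Source B: skip lines that strip to empty, bump the three counters
def pvCountStep (acc : Int × Int × Int) (l : List Char) : Int × Int × Int :=
  if (PySem.Chars.strip l).isEmpty then acc
  else
    ((acc.1 + if pyIsupperCs l && decide (l.length > 15) then 1 else 0),
     (acc.2.1 + if decide (l.length > 200) then 1 else 0),
     (acc.2.2 + if decide ((PySem.Chars.strip l).length ≤ 2) then 1 else 0))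

def score_formatting_alt (text : String) : Int × List String :=
  let counts := (PySem.Chars.splitOn text.toList ['\n']).foldl pvCountStep (0, 0, 0)
  let feedback : List String := []
  let deductions : Int := 0
  let (deductions, feedback) :=
    if counts.1 > 5 then
      (deductions + 5, feedback ++ ["Too many all-caps lines — use normal title case for headings."])
    else (deductions, feedback)
  let (deductions, feedback) :=
    if counts.2.1 > 3 then
      (deductions + 5, feedback ++ ["Some lines are very long — break up dense paragraphs."])
    else (deductions, feedback)
  let (deductions, feedback) :=
    if counts.2.2 > 10 then
      (deductions + 5, feedback ++ ["Possible formatting issues — check for stray characters or OCR artifacts."])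
    else (deductions, feedback)
  (max 0 (15 - deductions), feedback)

-- ===== PRECONDITION & SPEC =====
def Spec_score_formatting (text : String) (out : Int × List String) : Prop := out = score_formatting_alt text
instance (text : String) (out : Int × List String) : Decidable (Spec_score_formatting text out) := by unfold Spec_score_formatting; infer_instance

-- ===== CLAIM (what is proved, stated in full; the proofs are below) =====
def Claim_equal_score_formatting : Prop := ∀ (text : String), Dom_score_formatting text → Spec_score_formatting text (score_formatting text)

-- ===== LEMMAS AND PROOFS =====

set_option maxHeartbeats 1000000 in
lemma pvCountStep_foldl (ls : List (List Char)) (a b c : Int) :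
    ls.foldl pvCountStep (a, b, c) =
      (a + ((ls.filter (fun l => !(PySem.Chars.strip l).isEmpty)).filter
              (fun l => pyIsupperCs l && decide (l.length > 15))).length,
       b + ((ls.filter (fun l => !(PySem.Chars.strip l).isEmpty)).filter
              (fun l => decide (l.length > 200))).length,
       c + ((ls.filter (fun l => !(PySem.Chars.strip l).isEmpty)).filter
              (fun l => decide ((PySem.Chars.strip l).length ≤ 2))).length) := by
  induction ls generalizing a b c with
  | nil => simp
  | cons x xs ih =>
    simp only [List.foldl_cons, pvCountStep, List.filter_cons]
    by_cases hx : (PySem.Chars.strip x).isEmpty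
    · simp [hx, ih]
    · rw [if_neg hx, ih]
      simp only [hx, Bool.not_false, if_true]
      by_cases h1 : (pyIsupperCs x && decide (x.length > 15)) = true <;>
      by_cases h2 : (decide (x.length > 200)) = true <;>
      by_cases h3 : (decide ((PySem.Chars.strip x).length ≤ 2)) = true <;>
        simp [h1, h2, h3] <;> omega

-- ===== VERDICT (by name: the statement is the Claim_ definition above) =====
theorem score_formatting_spec : Claim_equal_score_formatting := by
  intro text _
  unfold Spec_score_formatting score_formatting score_formatting_alt
  rw [pvCountStep_foldl]
  simp only [zero_add]
  set ls := (PySem.Chars.splitOn text.toList ['\n']).filter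
      (fun l => !(PySem.Chars.strip l).isEmpty) with hls
  by_cases h1 : (ls.filter (fun l => pyIsupperCs l && decide (l.length > 15))).length > 5 <;>
  by_cases h2 : (ls.filter (fun l => decide (l.length > 200))).length > 3 <;>
  by_cases h3 : (ls.filter (fun l => decide ((PySem.Chars.strip l).length ≤ 2))).length > 10 <;>
    simp [h1, h2, h3]
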